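-- pv_equiv track=rewrite | github.com/pis7/enmgt5400-project3 | examples/sdc_parser.py | _split_tcl_list
-- ===== SOURCE A (Python) =====
-- def _split_tcl_list(s: str) -> list[str]:
--     items: list[str] = []
--     current: list[str] = []
--     depth = 0
--     for ch in s.strip():
--         if ch == "{":
--             depth += 1
--             current.append(ch)
--         elif ch == "}":
--             depth -= 1
--             current.append(ch)
--         elif ch.isspace() and depth == 0:
--             if current:
--                 items.append("".join(current).strip("{}"))
--                 current = []
--         else:
--             current.append(ch)
--     if current:
--         items.append("".join(current).strip("{}"))
--     return [item for item in items if item]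
-- ===== SOURCE B (Python) =====
-- def _split_tcl_list(s: str) -> list[str]:
--     s = s.strip()
--     items: list[str] = []
--     i, n = 0, len(s)
--     while i < n:
--         if s[i].isspace():
--             i += 1
--             continue
--         start = i
--         depth = 0
--         while i < n and not (s[i].isspace() and depth == 0):
--             if s[i] == "{":
--                 depth += 1
--             elif s[i] == "}":
--                 depth -= 1
--             i += 1
--         token = s[start:i].strip("{}")
--         if token:
--             items.append(token)
--     return items
-- ===== Notes on version B (the rewrite author's own statement) =====
-- stated objective: simpler
-- what changed: Replaced A's character-by-character fold over a (items, current, depth) state with an index-based scanner that skips whitespace, consumes one whole brace-aware token per outer iteration, and emits the stripped slice directly.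
import Mathlib
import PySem

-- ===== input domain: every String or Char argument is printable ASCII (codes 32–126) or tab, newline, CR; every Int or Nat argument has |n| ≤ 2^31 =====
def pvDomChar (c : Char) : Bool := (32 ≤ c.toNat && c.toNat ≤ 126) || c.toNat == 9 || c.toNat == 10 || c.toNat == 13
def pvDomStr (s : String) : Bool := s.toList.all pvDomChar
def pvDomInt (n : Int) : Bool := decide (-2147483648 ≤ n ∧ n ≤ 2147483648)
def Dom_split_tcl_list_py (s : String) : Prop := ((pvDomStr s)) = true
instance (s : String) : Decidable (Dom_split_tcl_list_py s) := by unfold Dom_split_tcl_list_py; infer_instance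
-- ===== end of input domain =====

-- B re-implements the char-accumulating fold as a token-at-a-time scanner (skip spaces, consume a whole token, emit); objective: simpler decomposition, same cost.

-- ===== PORT A =====
-- the for-loop of A: state (items, current, depth), one step per character
def pvALoop : List Char → List String × List Char × Int → List String × List Char × Int
  | [], st => st
  | c :: cs, (items, current, depth) =>
    if c = '{' then pvALoop cs (items, current ++ [c], depth + 1)
    else if c = '}' then pvALoop cs (items, current ++ [c], depth - 1)
    else if PySem.Chars.isspace c && depth == 0 then
      pvALoop cs ((if current.isEmpty then items else
        items ++ [String.ofList (PySem.Chars.stripChars current "{}".toList)]), [], depth)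
    else pvALoop cs (items, current ++ [c], depth)

def split_tcl_list_py (s : String) : List String :=
  let (items, current, _) := pvALoop (PySem.Str.strip s).toList ([], [], 0)
  let items := if current.isEmpty then items else
    items ++ [String.ofList (PySem.Chars.stripChars current "{}".toList)]
  items.filter (fun item => item ≠ "")

-- ===== PORT B =====
-- B's outer while-loop (pvBTokens: skip whitespace, start a token) and inner
-- while-loop (pvBTok: consume the token's characters, tracking depth; the
-- consumed slice s[start:i] is the accumulator acc), then strip('{}') and emit.
mutual
def pvBTokens : List Char → List String
  | [] => []
  | c :: cs =>
    if PySem.Chars.isspace c then pvBTokens cs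
    else pvBTok cs (if c = '{' then 1 else if c = '}' then -1 else 0) [c]
termination_by l => 3 * l.length

def pvBTok : List Char → Int → List Char → List String
  | [], _, acc => pvBEmit acc []
  | c :: cs, depth, acc =>
    if PySem.Chars.isspace c && depth == 0 then pvBEmit acc (c :: cs)
    else pvBTok cs (if c = '{' then depth + 1 else if c = '}' then depth - 1 else depth) (acc ++ [c])
termination_by l _ _ => 3 * l.length + 2

def pvBEmit (acc rest : List Char) : List String :=
  let token := String.ofList (PySem.Chars.stripChars acc "{}".toList)
  if token ≠ "" then token :: pvBTokens rest else pvBTokens rest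
termination_by 3 * rest.length + 1
end

def split_tcl_list_py_alt (s : String) : List String :=
  pvBTokens (PySem.Str.strip s).toList

-- ===== PRECONDITION & SPEC =====
def Spec_split_tcl_list_py (s : String) (out : List String) : Prop := out = split_tcl_list_py_alt s
instance (s : String) (out : List String) : Decidable (Spec_split_tcl_list_py s out) := by unfold Spec_split_tcl_list_py; infer_instance

-- ===== CLAIM (what is proved, stated in full; the proofs are below) =====
def Claim_equal_split_tcl_list_py : Prop := ∀ (s : String), Dom_split_tcl_list_py s → Spec_split_tcl_list_py s (split_tcl_list_py s)

-- ===== LEMMAS AND PROOFS =====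

-- finalize A's loop state: flush the pending token, then drop empty items
def pvFin (st : List String × List Char × Int) : List String :=
  (if st.2.1.isEmpty then st.1 else
    st.1 ++ [String.ofList (PySem.Chars.stripChars st.2.1 "{}".toList)]).filter (fun item => item ≠ "")

theorem pvMain (l : List Char) :
    (∀ items acc depth, acc ≠ [] →
      pvFin (pvALoop l (items, acc, depth)) =
        items.filter (fun item => item ≠ "") ++ pvBTok l depth acc) ∧
    (∀ items,
      pvFin (pvALoop l (items, [], 0)) =
        items.filter (fun item => item ≠ "") ++ pvBTokens l) := by
  induction l with
  | nil =>
    constructor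
    · intro items acc depth hacc
      rw [show pvBTok [] depth acc = pvBEmit acc [] from by rw [pvBTok],
          show pvALoop [] (items, acc, depth) = (items, acc, depth) from by simp [pvALoop]]
      have h0 : pvBTokens [] = [] := by rw [pvBTokens]
      simp only [pvBEmit, h0, pvFin]
      simp [hacc]
      split <;> simp_all
    · intro items
      rw [show pvBTokens [] = [] from by rw [pvBTokens],
          show pvALoop [] (items, ([] : List Char), (0 : Int)) = (items, [], 0) from by simp [pvALoop]]
      simp [pvFin]
  | cons c cs ih =>
    constructor
    · intro items acc depth hacc
      by_cases hbr : c = '{'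
      · subst hbr
        have h1 : PySem.Chars.isspace '{' = false := by decide
        rw [show pvBTok ('{' :: cs) depth acc = pvBTok cs (depth + 1) (acc ++ ['{']) from by
              rw [pvBTok]; simp [h1],
            show pvALoop ('{' :: cs) (items, acc, depth)
               = pvALoop cs (items, acc ++ ['{'], depth + 1) from by simp [pvALoop]]
        exact ih.1 items (acc ++ ['{']) (depth + 1) (by simp)
      · by_cases hbr2 : c = '}'
        · subst hbr2
          have h1 : PySem.Chars.isspace '}' = false := by decide
          rw [show pvBTok ('}' :: cs) depth acc = pvBTok cs (depth - 1) (acc ++ ['}']) from by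
                rw [pvBTok]; simp [h1],
              show pvALoop ('}' :: cs) (items, acc, depth)
                 = pvALoop cs (items, acc ++ ['}'], depth - 1) from by simp [pvALoop]]
          exact ih.1 items (acc ++ ['}']) (depth - 1) (by simp)
        · by_cases hsp : (PySem.Chars.isspace c && depth == 0) = true
          · have hc : PySem.Chars.isspace c = true := ((Bool.and_eq_true _ _).mp hsp).1
            have hd : depth = 0 := by
              have := ((Bool.and_eq_true _ _).mp hsp).2; simpa using this
            subst hd
            rw [show pvBTok (c :: cs) 0 acc = pvBEmit acc (c :: cs) from by
                  rw [pvBTok]; simp [hc],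
                show pvALoop (c :: cs) (items, acc, 0)
                   = pvALoop cs (items ++ [String.ofList (PySem.Chars.stripChars acc "{}".toList)], [], 0) from by
                  simp [pvALoop, hbr, hbr2, hc, hacc]]
            rw [ih.2 (items ++ [String.ofList (PySem.Chars.stripChars acc "{}".toList)])]
            simp only [pvBEmit]
            rw [show pvBTokens (c :: cs) = pvBTokens cs from by rw [pvBTokens]; simp [hc]]
            simp only [List.filter_append]
            split <;> simp_all
          · rw [show pvBTok (c :: cs) depth acc = pvBTok cs depth (acc ++ [c]) from by
                  rw [pvBTok]; simp [hsp, hbr, hbr2],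
                show pvALoop (c :: cs) (items, acc, depth)
                   = pvALoop cs (items, acc ++ [c], depth) from by simp [pvALoop, hbr, hbr2, hsp]]
            exact ih.1 items (acc ++ [c]) depth (by simp)
    · intro items
      by_cases hbr : c = '{'
      · subst hbr
        have h1 : PySem.Chars.isspace '{' = false := by decide
        rw [show pvBTokens ('{' :: cs) = pvBTok cs 1 ['{'] from by rw [pvBTokens]; simp [h1],
            show pvALoop ('{' :: cs) (items, ([] : List Char), (0 : Int))
               = pvALoop cs (items, ['{'], 1) from by simp [pvALoop]]
        exact ih.1 items ['{'] 1 (by simp)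
      · by_cases hbr2 : c = '}'
        · subst hbr2
          have h1 : PySem.Chars.isspace '}' = false := by decide
          rw [show pvBTokens ('}' :: cs) = pvBTok cs (-1) ['}'] from by rw [pvBTokens]; simp [h1],
              show pvALoop ('}' :: cs) (items, ([] : List Char), (0 : Int))
                 = pvALoop cs (items, ['}'], -1) from by simp [pvALoop]]
          exact ih.1 items ['}'] (-1) (by simp)
        · by_cases hc : PySem.Chars.isspace c = true
          · rw [show pvBTokens (c :: cs) = pvBTokens cs from by rw [pvBTokens]; simp [hc],
                show pvALoop (c :: cs) (items, ([] : List Char), (0 : Int))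
                   = pvALoop cs (items, [], 0) from by simp [pvALoop, hbr, hbr2, hc]]
            exact ih.2 items
          · rw [show pvBTokens (c :: cs) = pvBTok cs 0 [c] from by
                  rw [pvBTokens]; simp [hc, hbr, hbr2],
                show pvALoop (c :: cs) (items, ([] : List Char), (0 : Int))
                   = pvALoop cs (items, [c], 0) from by simp [pvALoop, hbr, hbr2, hc]]
            exact ih.1 items [c] 0 (by simp)

-- ===== VERDICT (by name: the statement is the Claim_ definition above) =====
theorem split_tcl_list_py_spec : Claim_equal_split_tcl_list_py := by
  intro s _
  unfold Spec_split_tcl_list_py split_tcl_list_py split_tcl_list_py_alt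
  have h := (pvMain (PySem.Str.strip s).toList).2 []
  simpa [pvFin] using h
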